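-- pv_equiv track=rewrite | github.com/ivanlin9/GradientBasedCaft | caft/spurious_correlations/datasets/gender.py | _count_gender_profession
-- ===== SOURCE A (Python) =====
-- FEMALE = ["she", "her"]
--
-- MALE = ["he", "him"]
--
-- def _count_gender_profession(data):
--     fem_doc_count = 0
--     fem_nurse_count = 0
--     male_doc_count = 0
--     male_nurse_count = 0
--     for x in data:
--         if x["label"] in FEMALE and x["profession"] == "doctor":
--             fem_doc_count += 1
--         elif x["label"] in FEMALE and x["profession"] == "nurse":
--             fem_nurse_count += 1
--         elif x["label"] in MALE and x["profession"] == "doctor":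
--             male_doc_count += 1
--         elif x["label"] in MALE and x["profession"] == "nurse":
--             male_nurse_count += 1
--     return fem_doc_count, fem_nurse_count, male_doc_count, male_nurse_count
-- ===== SOURCE B (Python) =====
-- FEMALE = ["she", "her"]
--
-- MALE = ["he", "him"]
--
-- def _count_gender_profession(data):
--     fem_doc = sum(1 for x in data if x["label"] in FEMALE and x["profession"] == "doctor")
--     fem_nurse = sum(1 for x in data if x["label"] in FEMALE and x["profession"] == "nurse")
--     male_doc = sum(1 for x in data if x["label"] in MALE and x["profession"] == "doctor")
--     male_nurse = sum(1 for x in data if x["label"] in MALE and x["profession"] == "nurse")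
--     return fem_doc, fem_nurse, male_doc, male_nurse
-- ===== Notes on version B (the rewrite author's own statement) =====
-- stated objective: alternative
-- what changed: Replaces the single loop with a 4-tuple accumulator and an elif chain by four independent filtered-count passes, one per disjoint bucket.
import Mathlib
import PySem

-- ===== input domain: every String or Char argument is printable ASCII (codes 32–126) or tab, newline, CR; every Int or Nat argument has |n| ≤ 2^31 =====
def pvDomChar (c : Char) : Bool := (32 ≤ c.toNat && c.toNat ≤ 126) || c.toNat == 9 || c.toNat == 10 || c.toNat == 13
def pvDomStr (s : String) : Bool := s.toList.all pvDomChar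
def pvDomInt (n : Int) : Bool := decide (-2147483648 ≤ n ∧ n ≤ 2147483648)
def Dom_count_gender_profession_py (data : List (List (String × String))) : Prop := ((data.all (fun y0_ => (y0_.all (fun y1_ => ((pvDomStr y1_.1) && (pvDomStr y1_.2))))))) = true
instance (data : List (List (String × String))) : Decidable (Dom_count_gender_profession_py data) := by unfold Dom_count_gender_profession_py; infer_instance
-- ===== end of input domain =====

-- B replaces A's single loop with a 4-tuple accumulator and elif chain by four
-- independent filtered-count passes (one per disjoint bucket); alternative, not faster.


-- ===== PORT A =====
-- x["label"] / x["profession"] are ported as getD with "" default: exact under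
-- Pre_ (the key exists whenever Python actually evaluates the access).
def count_gender_profession_py (data : List (List (String × String))) : Int × Int × Int × Int :=
  data.foldl (fun s x =>
    let lab := (PySem.Dict.ofList x).getD "label" ""
    let prof := (PySem.Dict.ofList x).getD "profession" ""
    if (lab == "she" || lab == "her") && prof == "doctor" then
      (s.1 + 1, s.2.1, s.2.2.1, s.2.2.2)
    else if (lab == "she" || lab == "her") && prof == "nurse" then
      (s.1, s.2.1 + 1, s.2.2.1, s.2.2.2)
    else if (lab == "he" || lab == "him") && prof == "doctor" then
      (s.1, s.2.1, s.2.2.1 + 1, s.2.2.2)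
    else if (lab == "he" || lab == "him") && prof == "nurse" then
      (s.1, s.2.1, s.2.2.1, s.2.2.2 + 1)
    else s) (0, 0, 0, 0)

-- ===== PORT B =====
def pvBucket (g1 g2 prof : String) (x : List (String × String)) : Bool :=
  let lab := (PySem.Dict.ofList x).getD "label" ""
  (lab == g1 || lab == g2) && (PySem.Dict.ofList x).getD "profession" "" == prof

def count_gender_profession_py_alt (data : List (List (String × String))) : Int × Int × Int × Int :=
  ((data.countP (pvBucket "she" "her" "doctor") : Int),
   (data.countP (pvBucket "she" "her" "nurse") : Int),
   (data.countP (pvBucket "he" "him" "doctor") : Int),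
   (data.countP (pvBucket "he" "him" "nurse") : Int))

-- ===== PRECONDITION & SPEC =====
-- Pre_ excludes exactly the inputs on which the Python A raises KeyError: a record
-- without a "label" key, or a record whose label is one of the four pronouns but
-- which lacks a "profession" key.
def Pre_count_gender_profession_py (data : List (List (String × String))) : Prop :=
  ∀ x ∈ data, ((PySem.Dict.ofList x).get? "label").isSome = true ∧
    ((PySem.Dict.ofList x).getD "label" "" = "she" ∨ (PySem.Dict.ofList x).getD "label" "" = "her" ∨
     (PySem.Dict.ofList x).getD "label" "" = "he" ∨ (PySem.Dict.ofList x).getD "label" "" = "him" →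
       ((PySem.Dict.ofList x).get? "profession").isSome = true)
instance (data : List (List (String × String))) : Decidable (Pre_count_gender_profession_py data) := by unfold Pre_count_gender_profession_py; infer_instance
def pvWitness_count_gender_profession_py : (List (List (String × String))) :=
  [[("label", "she"), ("profession", "doctor")], [("label", "they")]]

def Spec_count_gender_profession_py (data : List (List (String × String))) (out : Int × Int × Int × Int) : Prop := out = count_gender_profession_py_alt data
instance (data : List (List (String × String))) (out : Int × Int × Int × Int) : Decidable (Spec_count_gender_profession_py data out) := by unfold Spec_count_gender_profession_py; infer_instance

-- ===== CLAIM (what is proved, stated in full; the proofs are below) =====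
def Claim_equal_count_gender_profession_py : Prop := ∀ (data : List (List (String × String))), Dom_count_gender_profession_py data → Pre_count_gender_profession_py data → Spec_count_gender_profession_py data (count_gender_profession_py data)

-- ===== LEMMAS AND PROOFS =====

theorem fem_not_male {lab : String} (h : (lab == "she" || lab == "her") = true) :
    (lab == "he" || lab == "him") = false := by
  simp only [Bool.or_eq_true, beq_iff_eq] at h
  rcases h with h | h <;> subst h <;> decide

theorem male_not_fem {lab : String} (h : (lab == "he" || lab == "him") = true) :
    (lab == "she" || lab == "her") = false := by
  simp only [Bool.or_eq_true, beq_iff_eq] at h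
  rcases h with h | h <;> subst h <;> decide

theorem doc_not_nurse {p : String} (h : (p == "doctor") = true) : (p == "nurse") = false := by
  simp only [beq_iff_eq] at h; subst h; decide

theorem loop_eq (data : List (List (String × String))) (a b c d : Int) :
    data.foldl (fun s x =>
      let lab := (PySem.Dict.ofList x).getD "label" ""
      let prof := (PySem.Dict.ofList x).getD "profession" ""
      if (lab == "she" || lab == "her") && prof == "doctor" then
        (s.1 + 1, s.2.1, s.2.2.1, s.2.2.2)
      else if (lab == "she" || lab == "her") && prof == "nurse" then
        (s.1, s.2.1 + 1, s.2.2.1, s.2.2.2)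
      else if (lab == "he" || lab == "him") && prof == "doctor" then
        (s.1, s.2.1, s.2.2.1 + 1, s.2.2.2)
      else if (lab == "he" || lab == "him") && prof == "nurse" then
        (s.1, s.2.1, s.2.2.1, s.2.2.2 + 1)
      else s) ((a, b, c, d) : Int × Int × Int × Int)
    = (a + (data.countP (pvBucket "she" "her" "doctor") : Int),
       b + (data.countP (pvBucket "she" "her" "nurse") : Int),
       c + (data.countP (pvBucket "he" "him" "doctor") : Int),
       d + (data.countP (pvBucket "he" "him" "nurse") : Int)) := by
  induction data generalizing a b c d with
  | nil => simp
  | cons x t ih =>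
    rw [List.foldl_cons]
    dsimp only
    split_ifs with h1 h2 h3 h4
    · obtain ⟨hf, hd⟩ := Bool.and_eq_true_iff.mp h1
      rw [ih]
      simp only [List.countP_cons, pvBucket, h1, doc_not_nurse hd, fem_not_male hf]
      simp; omega
    · obtain ⟨hf, hn⟩ := Bool.and_eq_true_iff.mp h2
      rw [ih]
      simp only [List.countP_cons, pvBucket, h1, h2, fem_not_male hf]
      simp; omega
    · obtain ⟨hm, hd⟩ := Bool.and_eq_true_iff.mp h3
      rw [ih]
      simp only [List.countP_cons, pvBucket, h3, doc_not_nurse hd, male_not_fem hm]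
      simp; omega
    · obtain ⟨hm, hn⟩ := Bool.and_eq_true_iff.mp h4
      rw [ih]
      simp only [List.countP_cons, pvBucket, h3, h4, male_not_fem hm]
      simp; omega
    · rw [ih]
      simp only [List.countP_cons, pvBucket, h1, h2, h3, h4]
      simp

theorem count_gender_profession_py_eq (data : List (List (String × String))) :
    count_gender_profession_py data = count_gender_profession_py_alt data := by
  unfold count_gender_profession_py count_gender_profession_py_alt
  rw [loop_eq]
  simp

-- ===== VERDICT (by name: the statement is the Claim_ definition above) =====
theorem count_gender_profession_py_spec : Claim_equal_count_gender_profession_py := by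
  intro data _ _
  exact count_gender_profession_py_eq data
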